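-- pv_equiv track=rewrite | github.com/ilovehatecode/ud120-projects | tools/multi_testing.py | makeFeatureCombos
-- ===== SOURCE A (Python) =====
-- from itertools import combinations
--
-- def makeFeatureCombos(features_list, num_of_features, label):
--     combos_of_features = combinations(features_list, num_of_features)
--     combos_of_features = list(combos_of_features)
--     for i in range(0, len(combos_of_features)):
--         new_list = list()
--         new_list.append(label)
--         for j in range(0, len(combos_of_features[i])):
--             new_list.append(combos_of_features[i][j])
--         combos_of_features[i] = new_list
--
--     return combos_of_features
-- ===== SOURCE B (Python) =====
-- def makeFeatureCombos(features_list, num_of_features, label):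
--     items = list(features_list)
--     if num_of_features < 0:
--         return []
--     def rec(chosen, rest, remaining):
--         if remaining == 0:
--             return [[label] + chosen]
--         if len(rest) < remaining:
--             return []
--         first, tail = rest[0], rest[1:]
--         return rec(chosen + [first], tail, remaining - 1) + rec(chosen, tail, remaining)
--     return rec([], items, num_of_features)
-- ===== Notes on version B (the rewrite author's own statement) =====
-- stated objective: alternative
-- what changed: Replaced itertools.combinations plus an index-rewriting pass with a direct take/skip recursion that emits each [label, *combo] as it is completed, pruning branches where too few elements remain.
import Mathlib
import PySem

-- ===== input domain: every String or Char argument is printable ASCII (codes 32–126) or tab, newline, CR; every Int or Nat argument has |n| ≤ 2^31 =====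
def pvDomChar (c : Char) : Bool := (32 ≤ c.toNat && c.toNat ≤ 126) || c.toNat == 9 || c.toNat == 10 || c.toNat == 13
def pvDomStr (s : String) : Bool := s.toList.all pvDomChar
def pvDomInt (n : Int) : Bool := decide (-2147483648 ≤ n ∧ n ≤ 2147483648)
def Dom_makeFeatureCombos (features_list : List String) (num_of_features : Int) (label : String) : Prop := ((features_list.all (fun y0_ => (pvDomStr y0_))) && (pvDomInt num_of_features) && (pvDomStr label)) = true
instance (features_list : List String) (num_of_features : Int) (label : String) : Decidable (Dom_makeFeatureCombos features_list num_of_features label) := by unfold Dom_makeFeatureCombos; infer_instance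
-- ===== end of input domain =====

-- B replaces itertools.combinations + an index-rewriting pass by a direct take/skip recursion
-- that emits each [label, *combo] as it is completed (alternative decomposition, same cost).


-- ===== PORT A =====
-- itertools.combinations(xs, r): lexicographic-by-index k-subsets in input order.
def pyCombinations (k : Nat) (xs : List String) : List (List String) :=
  match k, xs with
  | 0, _ => [[]]
  | _ + 1, [] => []
  | k + 1, x :: rest => (pyCombinations k rest).map (x :: ·) ++ pyCombinations (k + 1) rest

def makeFeatureCombos (features_list : List String) (num_of_features : Int) (label : String) : List (List String) :=
  -- combinations raises ValueError for negative r; Pre_ excludes that, toNat is unused there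
  let combos := pyCombinations num_of_features.toNat features_list
  -- for i in range(len(combos)): rebuild element i as [label] with each field appended
  combos.map (fun combo => combo.foldl (fun acc x => acc ++ [x]) [label])

-- ===== PORT B =====
-- take/skip recursion: pick rest.head (take) or not (skip); emit label :: chosen at remaining = 0
def altRec (label : String) (chosen rest : List String) (remaining : Nat) : List (List String) :=
  match remaining with
  | 0 => [label :: chosen]
  | k + 1 =>
    if rest.length < k + 1 then []
    else
      match rest with
      | [] => []
      | first :: tail =>
        altRec label (chosen ++ [first]) tail k ++ altRec label chosen tail (k + 1)

def makeFeatureCombos_alt (features_list : List String) (num_of_features : Int) (label : String) : List (List String) :=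
  if num_of_features < 0 then []
  else altRec label [] features_list num_of_features.toNat

-- ===== PRECONDITION & SPEC =====
-- itertools.combinations raises ValueError when r is negative; Pre_ excludes exactly those inputs.
def Pre_makeFeatureCombos (features_list : List String) (num_of_features : Int) (label : String) : Prop := 0 ≤ num_of_features
instance (features_list : List String) (num_of_features : Int) (label : String) : Decidable (Pre_makeFeatureCombos features_list num_of_features label) := by unfold Pre_makeFeatureCombos; infer_instance
def pvWitness_makeFeatureCombos : List String × Int × String := (["a", "b", "c"], 2, "L")

def Spec_makeFeatureCombos (features_list : List String) (num_of_features : Int) (label : String) (out : List (List String)) : Prop := out = makeFeatureCombos_alt features_list num_of_features label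
instance (features_list : List String) (num_of_features : Int) (label : String) (out : List (List String)) : Decidable (Spec_makeFeatureCombos features_list num_of_features label out) := by unfold Spec_makeFeatureCombos; infer_instance

-- ===== CLAIM (what is proved, stated in full; the proofs are below) =====
def Claim_equal_makeFeatureCombos : Prop := ∀ (features_list : List String) (num_of_features : Int) (label : String), Dom_makeFeatureCombos features_list num_of_features label → Pre_makeFeatureCombos features_list num_of_features label → Spec_makeFeatureCombos features_list num_of_features label (makeFeatureCombos features_list num_of_features label)

-- ===== LEMMAS AND PROOFS =====

theorem foldl_snoc_eq_append (t : List String) : ∀ (init : List String),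
    t.foldl (fun acc x => acc ++ [x]) init = init ++ t := by
  induction t with
  | nil => simp
  | cons x xs ih => intro init; simp [List.foldl, ih]

theorem pyCombinations_nil_of_lt : ∀ (xs : List String) (k : Nat), xs.length < k →
    pyCombinations k xs = [] := by
  intro xs
  induction xs with
  | nil => intro k h; cases k with
    | zero => omega
    | succ k => simp [pyCombinations]
  | cons x rest ih =>
    intro k h
    cases k with
    | zero => omega
    | succ k =>
      simp only [pyCombinations]
      rw [ih k (by simpa using Nat.lt_of_succ_lt_succ h), ih (k + 1) (by simp at h; omega)]
      simp

theorem altRec_eq : ∀ (rest : List String) (k : Nat) (label : String) (chosen : List String),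
    altRec label chosen rest k
      = (pyCombinations k rest).map (fun t => label :: (chosen ++ t)) := by
  intro rest
  induction rest with
  | nil =>
    intro k label chosen
    cases k with
    | zero => simp [altRec, pyCombinations]
    | succ k => simp [altRec, pyCombinations]
  | cons f tail ih =>
    intro k label chosen
    cases k with
    | zero => simp [altRec, pyCombinations]
    | succ k =>
      simp only [altRec]
      by_cases h : (f :: tail).length < k + 1
      · rw [if_pos h, pyCombinations_nil_of_lt _ _ h]; simp
      · rw [if_neg h]
        simp only [pyCombinations, List.map_append, List.map_map]
        rw [ih k label (chosen ++ [f]), ih (k + 1) label chosen]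
        congr 1
        apply List.map_congr_left
        intro t _
        simp

-- ===== VERDICT (by name: the statement is the Claim_ definition above) =====
theorem makeFeatureCombos_spec : Claim_equal_makeFeatureCombos := by
  intro features_list num_of_features label _ hpre
  have h0 : 0 ≤ num_of_features := hpre
  unfold Spec_makeFeatureCombos makeFeatureCombos makeFeatureCombos_alt
  rw [if_neg (by omega)]
  rw [altRec_eq]
  apply List.map_congr_left
  intro t _
  rw [foldl_snoc_eq_append]
  simp
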